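-- pv_equiv track=rewrite | github.com/tempoxyz/pytempo | pytempo/tempo_address.py | _convertbits
-- ===== SOURCE A (Python) =====
-- from collections.abc import Sequence
--
-- def _convertbits(
--     data: Sequence[int], frombits: int, tobits: int, pad: bool = True
-- ) -> list[int]:
--     """General power-of-2 base conversion."""
--     acc = 0
--     bits = 0
--     ret: list[int] = []
--     maxv = (1 << tobits) - 1
--     for value in data:
--         if value < 0 or (value >> frombits):
--             raise ValueError(f"invalid value for convertbits: {value}")
--         acc = (acc << frombits) | value
--         bits += frombits
--         while bits >= tobits:
--             bits -= tobits
--             ret.append((acc >> bits) & maxv)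
--     if pad:
--         if bits:
--             ret.append((acc << (tobits - bits)) & maxv)
--     elif bits >= frombits or ((acc << (tobits - bits)) & maxv):
--         raise ValueError("invalid padding in convertbits")
--     return ret
-- ===== SOURCE B (Python) =====
-- def _convertbits(data, frombits, tobits, pad=True):
--     """General power-of-2 base conversion: fold the whole input into one big
--     integer bit stream, then slice tobits-sized groups off it."""
--     big = 0
--     for value in data:
--         if value < 0 or (value >> frombits):
--             raise ValueError(f"invalid value for convertbits: {value}")
--         big = (big << frombits) | value
--     total = len(data) * frombits
--     maxv = (1 << tobits) - 1
--     ret = [(big >> (total - (i + 1) * tobits)) & maxv for i in range(total // tobits)]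
--     leftover = total % tobits
--     if pad:
--         if leftover:
--             ret.append((big << (tobits - leftover)) & maxv)
--     elif leftover >= frombits or ((big << (tobits - leftover)) & maxv):
--         raise ValueError("invalid padding in convertbits")
--     return ret
-- ===== Notes on version B (the rewrite author's own statement) =====
-- stated objective: alternative
-- what changed: Instead of A's sliding accumulator with a nested emit-while loop interleaved per element, B folds the whole input into one big integer bit stream in a single validation pass and then produces the output in a separate pass by arithmetic slicing: element i is (big >> (total-(i+1)*tobits)) & maxv for i in range(total//tobits), with the leftover handled once from total % tobits.
-- outside the precondition, e.g. on _convertbits([], 3, 0, True): A returns [], B raises ZeroDivisionError; on _convertbits([], 9, 0, False): A returns [], B raises ZeroDivisionError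
import Mathlib
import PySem

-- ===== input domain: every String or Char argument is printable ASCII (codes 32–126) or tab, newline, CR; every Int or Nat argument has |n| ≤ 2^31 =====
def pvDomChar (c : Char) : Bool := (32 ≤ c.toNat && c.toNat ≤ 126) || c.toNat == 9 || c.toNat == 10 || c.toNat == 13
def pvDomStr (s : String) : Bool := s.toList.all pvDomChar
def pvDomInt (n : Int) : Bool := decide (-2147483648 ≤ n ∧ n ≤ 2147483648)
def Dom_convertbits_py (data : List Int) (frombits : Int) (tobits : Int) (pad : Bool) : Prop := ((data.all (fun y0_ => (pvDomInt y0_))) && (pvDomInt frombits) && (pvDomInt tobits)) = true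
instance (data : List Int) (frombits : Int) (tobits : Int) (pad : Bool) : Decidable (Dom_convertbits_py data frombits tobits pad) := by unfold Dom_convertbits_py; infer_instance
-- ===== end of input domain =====

-- B replaces A's per-element sliding accumulator + nested emit loop by one build pass into a
-- single big integer followed by a separate arithmetic slicing pass; same return value on Pre_.


-- ===== PORT A =====
-- inner 'while bits >= tobits' loop; the '1 ≤ tobits' guard is a pure termination guard
-- (for tobits ≤ 0 the Python while loop never terminates once entered; outside Pre_)
def pvWhileA (acc tobits maxv : Int) (bits : Int) (ret : List Int) : Int × List Int :=
  if _h : 1 ≤ tobits ∧ tobits ≤ bits then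
    pvWhileA acc tobits maxv (bits - tobits)
      (ret ++ [PySem.Int.band (acc >>> (bits - tobits).toNat) maxv])
  else (bits, ret)
termination_by bits.toNat
decreasing_by omega

-- the 'for value in data' loop; 'none' = the ValueError on the first invalid value
def pvLoopA (frombits tobits maxv : Int) : List Int → Int → Int → List Int → Option (Int × Int × List Int)
  | [], acc, bits, ret => some (acc, bits, ret)
  | v :: rest, acc, bits, ret =>
    if v < 0 ∨ v >>> frombits.toNat ≠ 0 then none
    else
      let acc' := PySem.Int.bor (acc <<< frombits.toNat) v
      let p := pvWhileA acc' tobits maxv (bits + frombits) ret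
      pvLoopA frombits tobits maxv rest acc' p.1 p.2

def convertbits_py (data : List Int) (frombits : Int) (tobits : Int) (pad : Bool) : List Int :=
  let maxv : Int := (1 <<< tobits.toNat) - 1
  match pvLoopA frombits tobits maxv data 0 0 [] with
  | none => []    -- ValueError (outside Pre_)
  | some (acc, bits, ret) =>
    if pad then
      (if bits ≠ 0 then ret ++ [PySem.Int.band (acc <<< (tobits - bits).toNat) maxv] else ret)
    else if bits ≥ frombits ∨ PySem.Int.band (acc <<< (tobits - bits).toNat) maxv ≠ 0 then
      []          -- ValueError "invalid padding" (outside Pre_)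
    else ret

-- ===== PORT B =====
-- single validation/build pass: fold all values into one big integer
def pvBuildB (frombits : Int) : List Int → Int → Option Int
  | [], big => some big
  | v :: rest, big =>
    if v < 0 ∨ v >>> frombits.toNat ≠ 0 then none
    else pvBuildB frombits rest (PySem.Int.bor (big <<< frombits.toNat) v)

def convertbits_py_alt (data : List Int) (frombits : Int) (tobits : Int) (pad : Bool) : List Int :=
  match pvBuildB frombits data 0 with
  | none => []    -- ValueError (outside Pre_)
  | some big =>
    let total : Int := data.length * frombits
    let maxv : Int := (1 <<< tobits.toNat) - 1
    let ret := (PySem.List.pyRange 0 (PySem.Int.floordiv total tobits) 1).map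
      (fun i => PySem.Int.band (big >>> (total - (i + 1) * tobits).toNat) maxv)
    let leftover := PySem.Int.mod total tobits
    if pad then
      (if leftover ≠ 0 then ret ++ [PySem.Int.band (big <<< (tobits - leftover).toNat) maxv] else ret)
    else if leftover ≥ frombits ∨ PySem.Int.band (big <<< (tobits - leftover).toNat) maxv ≠ 0 then
      []          -- ValueError "invalid padding" (outside Pre_)
    else ret

-- ===== PRECONDITION & SPEC =====
-- Pre_ = exactly the inputs where the Python A returns normally, EXCEPT that it also requires
-- 1 ≤ tobits when data = [] ∧ pad (there A returns [] before ever using tobits, while B's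
-- 'total // tobits' divides by zero; tobits ≤ 0 is a degenerate corner — see claim cites).
def Pre_convertbits_py (data : List Int) (frombits : Int) (tobits : Int) (pad : Bool) : Prop :=
  1 ≤ tobits ∧
  ((data = [] ∧ pad = true) ∨
    (0 ≤ frombits ∧ (∀ v ∈ data, 0 ≤ v ∧ v >>> frombits.toNat = 0) ∧
      (pad = false →
        ((data.length : Int) * frombits) % tobits < frombits ∧
        ∀ last ∈ data.getLast?, last % 2 ^ (((data.length : Int) * frombits) % tobits).toNat = 0)))
instance (data : List Int) (frombits : Int) (tobits : Int) (pad : Bool) : Decidable (Pre_convertbits_py data frombits tobits pad) := by unfold Pre_convertbits_py; infer_instance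

def pvWitness_convertbits_py : List Int × Int × Int × Bool := ([3, 7, 1], 3, 5, true)

def Spec_convertbits_py (data : List Int) (frombits : Int) (tobits : Int) (pad : Bool) (out : List Int) : Prop := out = convertbits_py_alt data frombits tobits pad
instance (data : List Int) (frombits : Int) (tobits : Int) (pad : Bool) (out : List Int) : Decidable (Spec_convertbits_py data frombits tobits pad out) := by unfold Spec_convertbits_py; infer_instance

-- ===== CLAIM (what is proved, stated in full; the proofs are below) =====
def Claim_equal_convertbits_py : Prop := ∀ (data : List Int) (frombits : Int) (tobits : Int) (pad : Bool), Dom_convertbits_py data frombits tobits pad → Pre_convertbits_py data frombits tobits pad → Spec_convertbits_py data frombits tobits pad (convertbits_py data frombits tobits pad)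

-- ===== LEMMAS AND PROOFS =====

-- Nat: or of disjoint bit ranges is addition
lemma pvLorAdd (a r m : Nat) (h : r < 2 ^ m) : a * 2 ^ m ||| r = a * 2 ^ m + r := by
  apply Nat.eq_of_testBit_eq
  intro j
  rw [Nat.testBit_or, Nat.testBit_mul_two_pow, mul_comm a, Nat.testBit_two_pow_mul_add a h]
  by_cases hj : j < m
  · simp [hj, Nat.not_le_of_lt hj]
  · have hr : r < 2 ^ j := lt_of_lt_of_le h (Nat.pow_le_pow_right (by norm_num) (Nat.le_of_not_lt hj))
    simp [hj, Nat.le_of_not_lt hj, Nat.testBit_eq_false_of_lt hr]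

-- Int version for the '(acc << frombits) | value' step
lemma pvBorAdd (a v : Int) (m : Nat) (ha : 0 ≤ a) (hv : 0 ≤ v) (hlt : v < 2 ^ m) :
    PySem.Int.bor (a <<< m) v = a * 2 ^ m + v := by
  rw [Int.shiftLeft_eq]
  have hc : (((2:Nat) ^ m : Nat) : Int) = (2:Int) ^ m := by push_cast; ring
  rw [PySem.Int.bor_of_nonneg (by positivity) hv]
  have h1 : (a * (2:Int) ^ m).toNat = a.toNat * 2 ^ m := by
    rw [← hc, Int.toNat_mul ha (by positivity), Int.toNat_natCast]
  rw [h1, pvLorAdd a.toNat v.toNat m (by omega)]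
  push_cast [Int.toNat_of_nonneg ha, Int.toNat_of_nonneg hv]
  ring

-- slicing a big integer above low garbage: (a*2^m + R) >> (s+m) = a >> s
lemma pvSlice (a R : Int) (m s : Nat) (ha : 0 ≤ a) (hR : 0 ≤ R) (hRlt : R < 2 ^ m) :
    (a * 2 ^ m + R) >>> (s + m) = a >>> s := by
  rw [Int.shiftRight_eq_div_pow, Int.shiftRight_eq_div_pow]
  have h2 : ((2 ^ (s + m) : Nat) : Int) = 2 ^ m * 2 ^ s := by push_cast [pow_add]; ring
  rw [h2, ← Int.ediv_ediv_eq_ediv_mul (by positivity)]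
  have h3 : (a * 2 ^ m + R) / 2 ^ m = a := by
    rw [add_comm, Int.add_mul_ediv_right _ _ (by positivity : (0:Int) < 2 ^ m).ne',
      Int.ediv_eq_zero_of_lt hR hRlt, zero_add]
  rw [h3]
  norm_cast

-- the lor-fold of the whole input ('big' in B, the final 'acc' in A)
def pvBig (f : Int) (big : Int) (l : List Int) : Int :=
  l.foldl (fun b v => PySem.Int.bor (b <<< f.toNat) v) big

lemma pvBig_cons (f big v : Int) (l : List Int) :
    pvBig f big (v :: l) = pvBig f (PySem.Int.bor (big <<< f.toNat) v) l := rfl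

lemma pvValid_lt (f v : Int) (hv : 0 ≤ v) (hs : v >>> f.toNat = 0) : v < 2 ^ f.toNat := by
  rw [Int.shiftRight_eq_div_pow] at hs
  have hc : (((2:Nat) ^ f.toNat : Nat) : Int) = (2:Int) ^ f.toNat := by push_cast; ring
  by_contra h
  have h1 : (1 : Int) ≤ v / ((2 ^ f.toNat : Nat) : Int) := by
    rw [Int.le_ediv_iff_mul_le (by positivity)]
    omega
  omega

-- decomposition: pvBig f big l = big * 2^(len*F) + (data bits of l), data bits bounded
lemma pvBig_decomp (f : Int) :
    ∀ (l : List Int) (big : Int), 0 ≤ big →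
      (∀ v ∈ l, 0 ≤ v ∧ v >>> f.toNat = 0) →
      pvBig f big l = big * 2 ^ (l.length * f.toNat) + pvBig f 0 l ∧
      0 ≤ pvBig f 0 l ∧ pvBig f 0 l < 2 ^ (l.length * f.toNat) := by
  intro l
  induction l with
  | nil => intro big hbig _; simp [pvBig]
  | cons v rest ih =>
    intro big hbig hval
    obtain ⟨hv0, hvs⟩ := hval v (by simp)
    have hvlt := pvValid_lt f v hv0 hvs
    have hval' : ∀ w ∈ rest, 0 ≤ w ∧ w >>> f.toNat = 0 :=
      fun w hw => hval w (List.mem_cons_of_mem v hw)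
    have hstep : ∀ b : Int, 0 ≤ b →
        PySem.Int.bor (b <<< f.toNat) v = b * 2 ^ f.toNat + v := fun b hb =>
      pvBorAdd b v f.toNat hb hv0 hvlt
    have hp : (0:Int) < 2 ^ f.toNat := by positivity
    have hbig' : (0:Int) ≤ big * 2 ^ f.toNat + v := by
      have := mul_nonneg hbig hp.le; omega
    obtain ⟨e1, e2, e3⟩ := ih (big * 2 ^ f.toNat + v) hbig' hval'
    obtain ⟨d1, _, _⟩ := ih v hv0 hval'
    have hz : pvBig f 0 (v :: rest) = pvBig f v rest := by
      rw [pvBig_cons, hstep 0 le_rfl]; norm_num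
    have hpow : (2:Int) ^ ((v :: rest).length * f.toNat)
        = 2 ^ f.toNat * 2 ^ (rest.length * f.toNat) := by
      rw [List.length_cons, ← pow_add]
      congr 1
      ring
    refine ⟨?_, ?_, ?_⟩
    · rw [pvBig_cons, hstep big hbig, e1, hz, d1, hpow]
      ring
    · rw [hz, d1]
      have := mul_nonneg hv0 (pow_nonneg (by norm_num : (0:Int) ≤ 2) (rest.length * f.toNat))
      omega
    · rw [hz, d1, hpow]
      nlinarith [pow_pos (by norm_num : (0:Int) < 2) (rest.length * f.toNat)]

-- B's build loop computes pvBig on valid data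
lemma pvBuildB_eq (f : Int) :
    ∀ (l : List Int) (big : Int), (∀ v ∈ l, 0 ≤ v ∧ v >>> f.toNat = 0) →
      pvBuildB f l big = some (pvBig f big l) := by
  intro l
  induction l with
  | nil => intro big _; rfl
  | cons v rest ih =>
    intro big hval
    obtain ⟨hv0, hvs⟩ := hval v (by simp)
    have hcond : ¬(v < 0 ∨ v >>> f.toNat ≠ 0) := by push_neg; exact ⟨by omega, hvs⟩
    simp only [pvBuildB, if_neg hcond]
    exact ih _ (fun w hw => hval w (List.mem_cons_of_mem v hw))

-- the inner while loop, characterised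
lemma pvWhileA_spec (acc t maxv : Int) (ht : 1 ≤ t) :
    ∀ (k : Nat) (bits : Int) (ret : List Int), 0 ≤ bits → k = (bits / t).toNat →
      pvWhileA acc t maxv bits ret =
        (bits % t,
         ret ++ (List.range k).map
           (fun (i : Nat) => PySem.Int.band (acc >>> (bits - ((i : Int) + 1) * t).toNat) maxv)) := by
  intro k
  induction k with
  | zero =>
    intro bits ret hb hk
    have hq : 0 ≤ bits / t := Int.ediv_nonneg hb (by omega)
    have h0 : bits / t ≤ 0 := Int.toNat_eq_zero.mp hk.symm
    have hlt : bits < t := by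
      by_contra h
      have h1 : (1:Int) ≤ bits / t := by rw [Int.le_ediv_iff_mul_le (by omega)]; omega
      omega
    rw [pvWhileA, dif_neg (by omega)]
    simp [Int.emod_eq_of_lt hb hlt]
  | succ k ih =>
    intro bits ret hb hk
    have hq : 0 ≤ bits / t := Int.ediv_nonneg hb (by omega)
    have hbt' : bits / t = (k : Int) + 1 := by
      rw [← Int.toNat_of_nonneg hq, ← hk]
      push_cast
      ring
    have hge : t ≤ bits := by
      by_contra h
      rw [Int.ediv_eq_zero_of_lt hb (by omega)] at hbt'
      omega
    have hdiv : (bits - t) / t = (k : Int) := by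
      have h := Int.add_mul_ediv_right bits (-1) (show t ≠ 0 by omega)
      have h2 : bits + -1 * t = bits - t := by ring
      rw [h2, hbt'] at h
      rw [h]
      ring
    have hknew : k = ((bits - t) / t).toNat := by rw [hdiv, Int.toNat_natCast]
    rw [pvWhileA, dif_pos ⟨ht, hge⟩]
    rw [ih (bits - t) _ (by omega) hknew]
    refine Prod.ext ?_ ?_
    · exact Int.sub_emod_right bits t
    · show _ ++ _ = ret ++ _
      have hr : List.range (k + 1) = 0 :: (List.range k).map Nat.succ := List.range_succ_eq_map
      rw [hr, List.map_cons, List.map_map, List.append_assoc, List.singleton_append]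
      congr 1
      congr 1
      · norm_num
      · apply List.map_congr_left
        intro i _
        simp only [Function.comp_apply]
        congr 2
        push_cast
        ring

-- the outer for loop, characterised: final acc, leftover bit count, and all emitted
-- groups as slices of the full bit stream
lemma pvLoopA_spec (f t maxv : Int) (hf : 0 ≤ f) (ht : 1 ≤ t) :
    ∀ (data : List Int) (acc bits : Int) (ret : List Int),
      0 ≤ acc → 0 ≤ bits → bits < t →
      (∀ v ∈ data, 0 ≤ v ∧ v >>> f.toNat = 0) →
      pvLoopA f t maxv data acc bits ret =
        some (pvBig f acc data, (bits + (data.length : Int) * f) % t,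
          ret ++ (List.range ((bits + (data.length : Int) * f) / t).toNat).map
            (fun (i : Nat) => PySem.Int.band
              (pvBig f acc data >>> (bits + (data.length : Int) * f - ((i : Int) + 1) * t).toNat)
              maxv)) := by
  intro data
  induction data with
  | nil =>
    intro acc bits ret hacc hb hbt _
    simp only [pvLoopA, pvBig, List.foldl_nil, List.length_nil, Int.natCast_zero, zero_mul,
      add_zero]
    rw [Int.emod_eq_of_lt hb hbt, Int.ediv_eq_zero_of_lt hb hbt]
    simp
  | cons v rest ih =>
    intro acc bits ret hacc hb hbt hval
    obtain ⟨hv0, hvs⟩ := hval v (by simp)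
    have hvlt := pvValid_lt f v hv0 hvs
    have hval' : ∀ w ∈ rest, 0 ≤ w ∧ w >>> f.toNat = 0 :=
      fun w hw => hval w (List.mem_cons_of_mem v hw)
    have hcond : ¬(v < 0 ∨ v >>> f.toNat ≠ 0) := by push_neg; exact ⟨by omega, hvs⟩
    have hacc' : PySem.Int.bor (acc <<< f.toNat) v = acc * 2 ^ f.toNat + v :=
      pvBorAdd acc v f.toNat hacc hv0 hvlt
    have hp : (0:Int) < 2 ^ f.toNat := by positivity
    have hA0 : (0:Int) ≤ acc * 2 ^ f.toNat + v := by
      have := mul_nonneg hacc hp.le; omega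
    have hnf0 : (0:Int) ≤ (rest.length : Int) * f :=
      mul_nonneg (by positivity) hf
    have hq1nn : 0 ≤ (bits + f) / t := Int.ediv_nonneg (by omega) (by omega)
    have hr1nn : 0 ≤ (bits + f) % t := Int.emod_nonneg _ (by omega)
    have hr1lt : (bits + f) % t < t := Int.emod_lt_of_pos _ (by omega)
    have hsplit : t * ((bits + f) / t) + (bits + f) % t = bits + f := Int.ediv_add_emod _ _
    simp only [pvLoopA, if_neg hcond]
    rw [hacc']
    rw [pvWhileA_spec (acc * 2 ^ f.toNat + v) t maxv ht ((bits + f) / t).toNat (bits + f) ret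
      (by omega) rfl]
    dsimp only
    rw [ih (acc * 2 ^ f.toNat + v) ((bits + f) % t) _ hA0 hr1nn hr1lt hval']
    have hBfold : pvBig f acc (v :: rest) = pvBig f (acc * 2 ^ f.toNat + v) rest := by
      rw [pvBig_cons, hacc']
    rw [hBfold]
    have harg : bits + ((v :: rest).length : Int) * f = bits + f + (rest.length : Int) * f := by
      simp only [List.length_cons]
      push_cast
      ring
    rw [harg]
    obtain ⟨hd1, hd2, hd3⟩ := pvBig_decomp f rest (acc * 2 ^ f.toNat + v) hA0 hval'
    have e2 : (bits + f + (rest.length : Int) * f) / t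
        = ((bits + f) % t + (rest.length : Int) * f) / t + (bits + f) / t := by
      have e1 : bits + f + (rest.length : Int) * f
          = ((bits + f) % t + (rest.length : Int) * f) + ((bits + f) / t) * t := by
        linear_combination (-1 : Int) * hsplit
      rw [e1, Int.add_mul_ediv_right _ _ (show t ≠ 0 by omega)]
    have hK2nn : 0 ≤ ((bits + f) % t + (rest.length : Int) * f) / t :=
      Int.ediv_nonneg (by omega) (by omega)
    have hKsplit : ((bits + f + (rest.length : Int) * f) / t).toNat
        = ((bits + f) / t).toNat + (((bits + f) % t + (rest.length : Int) * f) / t).toNat := by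
      rw [e2, Int.toNat_add hK2nn hq1nn, Nat.add_comm]
    refine congrArg some (Prod.ext rfl (Prod.ext ?_ ?_))
    · -- leftover bit count
      show ((bits + f) % t + (rest.length : Int) * f) % t
          = (bits + f + (rest.length : Int) * f) % t
      rw [Int.emod_add_emod]
    · -- emitted list
      show (ret ++ _) ++ _ = ret ++ _
      rw [List.append_assoc]
      congr 1
      rw [hKsplit, List.range_add, List.map_append, List.map_map]
      congr 1
      · -- groups emitted while processing v are slices of the final stream
        apply List.map_congr_left
        intro i hi
        rw [List.mem_range] at hi
        have hi' : ((i : Nat) : Int) < (bits + f) / t := by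
          have h1 : ((i : Nat) : Int) < (((bits + f) / t).toNat : Int) := by exact_mod_cast hi
          rwa [Int.toNat_of_nonneg hq1nn] at h1
        have hile : ((i : Int) + 1) * t ≤ bits + f := by
          have h2 : ((i : Int) + 1) * t ≤ ((bits + f) / t) * t :=
            mul_le_mul_of_nonneg_right (by omega) (by omega)
          nlinarith [hsplit]
        have hs0 : 0 ≤ bits + f - ((i : Int) + 1) * t := by omega
        have hnfc : (rest.length : Int) * f = ((rest.length * f.toNat : Nat) : Int) := by
          push_cast [Int.toNat_of_nonneg hf]
          ring
        have hargeq : bits + f + (rest.length : Int) * f - ((i : Int) + 1) * t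
            = (bits + f - ((i : Int) + 1) * t) + ((rest.length * f.toNat : Nat) : Int) := by
          rw [← hnfc]; ring
        have htn : (bits + f + (rest.length : Int) * f - ((i : Int) + 1) * t).toNat
            = (bits + f - ((i : Int) + 1) * t).toNat + rest.length * f.toNat := by
          rw [hargeq, Int.toNat_add hs0 (by positivity), Int.toNat_natCast]
        rw [htn, hd1]
        congr 1
        exact (pvSlice (acc * 2 ^ f.toNat + v) (pvBig f 0 rest) (rest.length * f.toNat)
          (bits + f - ((i : Int) + 1) * t).toNat hA0 hd2 hd3).symm
      · -- groups emitted later: same slices, re-indexed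
        apply List.map_congr_left
        intro i _
        simp only [Function.comp_apply]
        have hq1c : ((((bits + f) / t).toNat : Nat) : Int) = (bits + f) / t :=
          Int.toNat_of_nonneg hq1nn
        have harg2 : bits + f + (rest.length : Int) * f
              - (((((bits + f) / t).toNat + i : Nat) : Int) + 1) * t
            = (bits + f) % t + (rest.length : Int) * f - ((i : Int) + 1) * t := by
          push_cast [hq1c]
          linear_combination (-1 : Int) * hsplit
        exact congrArg
          (fun z : Int => PySem.Int.band (pvBig f (acc * 2 ^ f.toNat + v) rest >>> z.toNat) maxv)
          harg2.symm

-- ===== VERDICT (by name: the statement is the Claim_ definition above) =====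
theorem convertbits_py_spec : Claim_equal_convertbits_py := by
  intro data f t pad _ hpre
  unfold Spec_convertbits_py
  obtain ⟨ht, hcase⟩ := hpre
  rcases hcase with ⟨hnil, hpad⟩ | ⟨hf, hval, _⟩
  · -- empty input with pad: both return []
    subst hnil hpad
    simp only [convertbits_py, convertbits_py_alt, pvLoopA, pvBuildB, List.length_nil,
      Int.natCast_zero, zero_mul]
    rw [PySem.Int.floordiv_eq_ediv_of_pos (by omega), PySem.Int.mod_eq_emod_of_pos (by omega)]
    norm_num [PySem.List.pyRange_one]
  · -- general case
    simp only [convertbits_py, convertbits_py_alt]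
    rw [pvBuildB_eq f data 0 hval,
      pvLoopA_spec f t ((1 <<< t.toNat) - 1) hf ht data 0 0 [] le_rfl le_rfl (by omega) hval]
    dsimp only
    rw [PySem.Int.floordiv_eq_ediv_of_pos (by omega), PySem.Int.mod_eq_emod_of_pos (by omega)]
    have hz : (0 : Int) + (data.length : Int) * f = (data.length : Int) * f := by ring
    rw [hz]
    have hlist : (PySem.List.pyRange 0 ((data.length : Int) * f / t) 1).map
          (fun (i : Int) => PySem.Int.band
            (pvBig f 0 data >>> ((data.length : Int) * f - (i + 1) * t).toNat)
            ((1 <<< t.toNat) - 1))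
        = (List.range (((data.length : Int) * f / t).toNat)).map
            (fun (i : Nat) => PySem.Int.band
              (pvBig f 0 data >>> ((data.length : Int) * f - ((i : Int) + 1) * t).toNat)
              ((1 <<< t.toNat) - 1)) := by
      rw [PySem.List.pyRange_one, List.map_map]
      simp only [sub_zero]
      apply List.map_congr_left
      intro i _
      simp only [Function.comp_apply]
      norm_num
    rw [hlist]
    simp only [List.nil_append]
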